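-- pv_equiv track=rewrite | github.com/dominicmazza/Course-Directory-Scheduling | Constraint Satisfaction Class Scheduling.py | cofl_coreq
-- ===== SOURCE A (Python) =====
-- def cofl_coreq(avail_slots, coreqs, times, rooms):
--     conflicts = 0
--     for time in times:
--         courses = []
--         for room in avail_slots:
--             times = avail_slots[room]
--             for t in times:
--                 if t == time:
--                     pair = times[time]
--                     courses.append(pair[0])
--         for pair in coreqs:
--             count = 0
--             for coreq in pair:
--                 if coreq in courses:
--                     count += 1
--             if count > 1:
--                 conflicts += 1
--     return conflicts
-- ===== SOURCE B (Python) =====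
-- def cofl_coreq(avail_slots, coreqs, times, rooms):
--     # One pass over the rooms/slots builds time -> set of first-listed courses;
--     # then each (time, coreq pair) check is O(pair) with O(1) membership tests.
--     needed = set(times)
--     by_time = {}
--     for slots in avail_slots.values():
--         for t, pair in slots.items():
--             if t in needed:
--                 by_time.setdefault(t, set()).add(pair[0])
--     conflicts = 0
--     for time in times:
--         courses = by_time.get(time, set())
--         for pair in coreqs:
--             if sum(1 for c in pair if c in courses) > 1:
--                 conflicts += 1
--     return conflicts
-- ===== Notes on version B (the rewrite author's own statement) =====
-- stated objective: faster
-- what changed: B replaces A's per-time rescan of all rooms/slots with a single pass that builds a time->set-of-first-courses dict, then counts conflicting coreq pairs with O(1) set membership tests.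
import Mathlib
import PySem

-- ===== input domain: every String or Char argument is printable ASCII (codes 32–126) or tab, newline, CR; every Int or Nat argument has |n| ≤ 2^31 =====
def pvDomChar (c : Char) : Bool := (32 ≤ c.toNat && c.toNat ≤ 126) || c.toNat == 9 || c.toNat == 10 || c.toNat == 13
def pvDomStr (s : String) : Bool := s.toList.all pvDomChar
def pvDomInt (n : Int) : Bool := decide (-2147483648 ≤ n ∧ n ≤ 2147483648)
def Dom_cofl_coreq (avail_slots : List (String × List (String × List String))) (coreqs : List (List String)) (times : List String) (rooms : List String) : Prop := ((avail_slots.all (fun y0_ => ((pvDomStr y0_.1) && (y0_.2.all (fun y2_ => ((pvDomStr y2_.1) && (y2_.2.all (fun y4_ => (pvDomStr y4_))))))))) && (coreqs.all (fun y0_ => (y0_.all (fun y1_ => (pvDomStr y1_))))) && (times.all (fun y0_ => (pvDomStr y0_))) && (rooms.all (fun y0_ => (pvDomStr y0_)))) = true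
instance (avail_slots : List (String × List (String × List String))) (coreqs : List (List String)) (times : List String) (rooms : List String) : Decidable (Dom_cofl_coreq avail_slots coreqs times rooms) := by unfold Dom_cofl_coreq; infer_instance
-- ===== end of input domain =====

-- B replaces A's per-time rescan of every room with one pass building time → set of
-- first-listed courses, then counts conflicts with O(1) membership tests (objective: faster).

-- ===== PORT A =====
-- transliteration of A: for each time, rescan all rooms/slots collecting first courses,
-- then count coreq pairs with more than one member scheduled then.
-- 'times[time]' (dict lookup) is the first entry of the room's slot list with that key.
def cofl_coreq (avail_slots : List (String × List (String × List String))) (coreqs : List (List String)) (times : List String) (rooms : List String) : Int :=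
  times.foldl (fun conflicts time =>
    let courses : List String := avail_slots.foldl (fun cs rm =>
      rm.2.foldl (fun cs tp =>
        if tp.1 == time then
          cs ++ [PySem.List.pyGetD (((rm.2.find? (fun q => q.1 == time)).map Prod.snd).getD []) 0 ""]
        else cs) cs) []
    coreqs.foldl (fun conflicts pair =>
      let count : Int := pair.foldl (fun c coreq => if coreq ∈ courses then c + 1 else c) 0
      if count > 1 then conflicts + 1 else conflicts) conflicts) 0

-- ===== PORT B =====
-- transliteration of Source B: build time → set of first courses in one pass, then count.
def cofl_coreq_alt (avail_slots : List (String × List (String × List String))) (coreqs : List (List String)) (times : List String) (rooms : List String) : Int :=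
  let needed : PySem.Set String := PySem.Set.ofList times
  let byTime : PySem.Dict String (List String) :=
    avail_slots.foldl (fun d rm =>
      rm.2.foldl (fun d tp =>
        if tp.1 ∈ needed then
          d.modify tp.1 [] (fun s => PySem.Set.add s (PySem.List.pyGetD tp.2 0 ""))
        else d) d) PySem.Dict.empty
  times.foldl (fun conflicts time =>
    let courses : List String := byTime.getD time []
    coreqs.foldl (fun conflicts pair =>
      if (1 : Int) < (pair.countP (fun c => decide (c ∈ courses)) : Int) then conflicts + 1
      else conflicts) conflicts) 0

-- ===== PRECONDITION & SPEC =====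
-- Pre_ excludes inputs where A raises IndexError (a slot list that is empty for a scheduled
-- time), and restricts each room's slot association list to distinct keys — a Python dict
-- (the declared type of avail_slots' values) can never present duplicate keys.
def Pre_cofl_coreq (avail_slots : List (String × List (String × List String))) (coreqs : List (List String)) (times : List String) (rooms : List String) : Prop :=
  (∀ rm ∈ avail_slots, (rm.2.map Prod.fst).Nodup) ∧
  (∀ rm ∈ avail_slots, ∀ tp ∈ rm.2, tp.1 ∈ times → tp.2 ≠ [])
instance (avail_slots : List (String × List (String × List String))) (coreqs : List (List String)) (times : List String) (rooms : List String) : Decidable (Pre_cofl_coreq avail_slots coreqs times rooms) := by unfold Pre_cofl_coreq; infer_instance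
def pvWitness_cofl_coreq : (List (String × List (String × List String))) × List (List String) × List String × List String :=
  ([("r1", [("t1", ["a"])]), ("r2", [("t1", ["b"]), ("t2", ["c"])])], [["a", "b"], ["a", "c"]], ["t1", "t2"], ["r1", "r2"])

def Spec_cofl_coreq (avail_slots : List (String × List (String × List String))) (coreqs : List (List String)) (times : List String) (rooms : List String) (out : Int) : Prop := out = cofl_coreq_alt avail_slots coreqs times rooms
instance (avail_slots : List (String × List (String × List String))) (coreqs : List (List String)) (times : List String) (rooms : List String) (out : Int) : Decidable (Spec_cofl_coreq avail_slots coreqs times rooms out) := by unfold Spec_cofl_coreq; infer_instance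

-- ===== CLAIM (what is proved, stated in full; the proofs are below) =====
def Claim_equal_cofl_coreq : Prop := ∀ (avail_slots : List (String × List (String × List String))) (coreqs : List (List String)) (times : List String) (rooms : List String), Dom_cofl_coreq avail_slots coreqs times rooms → Pre_cofl_coreq avail_slots coreqs times rooms → Spec_cofl_coreq avail_slots coreqs times rooms (cofl_coreq avail_slots coreqs times rooms)

-- ===== LEMMAS AND PROOFS =====

-- the courses-at-`time` relation both programs realise
def pvSched (avail_slots : List (String × List (String × List String))) (time c : String) : Prop :=
  ∃ rm ∈ avail_slots, ∃ tp ∈ rm.2, tp.1 = time ∧ PySem.List.pyGetD tp.2 0 "" = c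

lemma find?_of_nodup_key {sl : List (String × List String)} (hnd : (sl.map Prod.fst).Nodup)
    {tp : String × List String} (hmem : tp ∈ sl) :
    sl.find? (fun q => q.1 == tp.1) = some tp := by
  induction sl with
  | nil => cases hmem
  | cons hd tl ih =>
    simp only [List.map_cons, List.nodup_cons] at hnd
    rcases List.mem_cons.mp hmem with h | h
    · subst h; simp [List.find?]
    · have hne : (hd.1 == tp.1) = false := by
        simp only [beq_eq_false_iff_ne, ne_eq]
        intro he
        exact hnd.1 (he ▸ (List.mem_map.mpr ⟨tp, h, rfl⟩))
      rw [List.find?, hne]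
      exact ih hnd.2 h

lemma memA_courses (avail_slots : List (String × List (String × List String)))
    (time c : String)
    (hnd : ∀ rm ∈ avail_slots, (rm.2.map Prod.fst).Nodup) :
    (c ∈ avail_slots.foldl (fun cs rm =>
      rm.2.foldl (fun cs tp =>
        if tp.1 == time then
          cs ++ [PySem.List.pyGetD (((rm.2.find? (fun q => q.1 == time)).map Prod.snd).getD []) 0 ""]
        else cs) cs) ([] : List String)) ↔ pvSched avail_slots time c := by
  have h1 : (avail_slots.foldl (fun cs rm =>
      rm.2.foldl (fun cs tp =>
        if tp.1 == time then
          cs ++ [PySem.List.pyGetD (((rm.2.find? (fun q => q.1 == time)).map Prod.snd).getD []) 0 ""]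
        else cs) cs) ([] : List String))
      = [] ++ avail_slots.flatMap (fun rm => ((rm.2.filter (fun tp => tp.1 == time)).map (fun _ =>
          PySem.List.pyGetD (((rm.2.find? (fun q => q.1 == time)).map Prod.snd).getD []) 0 ""))) :=
    (PySem.List.foldl_congr_mem _ _ _ _
      (fun cs rm _ => PySem.List.foldl_append_if _ _ _ _)).trans
      (PySem.List.foldl_append_eq_flatMap _ _ _)
  rw [h1]
  simp only [List.nil_append, List.mem_flatMap, List.mem_map, List.mem_filter, pvSched]
  constructor
  · rintro ⟨rm, hrm, ⟨tp, ⟨htp, heq⟩, hc⟩⟩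
    refine ⟨rm, hrm, tp, htp, beq_iff_eq.mp heq, ?_⟩
    have hf : rm.2.find? (fun q => q.1 == time) = some tp := by
      rw [← beq_iff_eq.mp heq]; exact find?_of_nodup_key (hnd rm hrm) htp
    rw [hf] at hc; simpa using hc
  · rintro ⟨rm, hrm, tp, htp, heq, hc⟩
    refine ⟨rm, hrm, ⟨tp, ⟨htp, beq_iff_eq.mpr heq⟩, ?_⟩⟩
    have hf : rm.2.find? (fun q => q.1 == time) = some tp := by
      rw [← heq]; exact find?_of_nodup_key (hnd rm hrm) htp
    rw [hf]; simpa using hc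

lemma memB_step (times : List String) (d : PySem.Dict String (List String))
    (tp : String × List String) (t c : String) :
    (c ∈ ((if tp.1 ∈ PySem.Set.ofList times then
        d.modify tp.1 [] (fun s => PySem.Set.add s (PySem.List.pyGetD tp.2 0 ""))
      else d).getD t [])) ↔
      c ∈ d.getD t [] ∨ (t ∈ times ∧ tp.1 = t ∧ PySem.List.pyGetD tp.2 0 "" = c) := by
  by_cases hmem : tp.1 ∈ PySem.Set.ofList times
  · rw [if_pos hmem, PySem.Dict.getD_modify]
    have htimes : tp.1 ∈ times := (PySem.Set.mem_ofList _ _).mp hmem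
    by_cases ht : t = tp.1
    · rw [if_pos ht, PySem.Set.mem_add]
      subst ht
      constructor
      · rintro (h | h)
        · exact Or.inl h
        · exact Or.inr ⟨htimes, rfl, h.symm⟩
      · rintro (h | ⟨_, _, h⟩)
        · exact Or.inl h
        · exact Or.inr h.symm
    · rw [if_neg ht]
      constructor
      · exact Or.inl
      · rintro (h | ⟨_, h, _⟩)
        · exact h
        · exact absurd h.symm ht
  · rw [if_neg hmem]
    have htimes : tp.1 ∉ times := fun h => hmem ((PySem.Set.mem_ofList _ _).mpr h)
    constructor
    · exact Or.inl
    · rintro (h | ⟨h1, h2, _⟩)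
      · exact h
      · exact absurd (h2 ▸ h1) htimes

lemma memB_inner (times : List String) (L : List (String × List String))
    (d : PySem.Dict String (List String)) (t c : String) :
    (c ∈ (L.foldl (fun d tp =>
        if tp.1 ∈ PySem.Set.ofList times then
          d.modify tp.1 [] (fun s => PySem.Set.add s (PySem.List.pyGetD tp.2 0 ""))
        else d) d).getD t []) ↔
      c ∈ d.getD t [] ∨ (t ∈ times ∧ ∃ tp ∈ L, tp.1 = t ∧ PySem.List.pyGetD tp.2 0 "" = c) := by
  induction L generalizing d with
  | nil => simp
  | cons tp L ih =>
    rw [List.foldl_cons, ih, memB_step, List.exists_mem_cons_iff]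
    tauto

lemma memB_outer (times : List String) (AS : List (String × List (String × List String)))
    (d : PySem.Dict String (List String)) (t c : String) :
    (c ∈ (AS.foldl (fun d rm =>
      rm.2.foldl (fun d tp =>
        if tp.1 ∈ PySem.Set.ofList times then
          d.modify tp.1 [] (fun s => PySem.Set.add s (PySem.List.pyGetD tp.2 0 ""))
        else d) d) d).getD t []) ↔
      c ∈ d.getD t [] ∨ (t ∈ times ∧ pvSched AS t c) := by
  induction AS generalizing d with
  | nil => simp [pvSched]
  | cons rm rest ih =>
    rw [List.foldl_cons, ih, memB_inner]
    simp only [pvSched, List.exists_mem_cons_iff]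
    constructor
    · rintro ((h | ⟨h1, h2⟩) | ⟨h1, h2⟩)
      · exact Or.inl h
      · exact Or.inr ⟨h1, Or.inl h2⟩
      · exact Or.inr ⟨h1, Or.inr h2⟩
    · rintro (h | ⟨h1, h2 | h2⟩)
      · exact Or.inl (Or.inl h)
      · exact Or.inl (Or.inr ⟨h1, h2⟩)
      · exact Or.inr ⟨h1, h2⟩

lemma count_if_congr (pair LA LB : List String) (h : ∀ x, x ∈ LA ↔ x ∈ LB) (acc : Int) :
    (if (pair.foldl (fun c coreq => if coreq ∈ LA then c + 1 else c) (0 : Int)) > 1 then acc + 1 else acc)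
      = (if (1 : Int) < (pair.countP (fun c => decide (c ∈ LB)) : Int) then acc + 1 else acc) := by
  rw [PySem.List.foldl_ite_add_one, zero_add,
    List.countP_congr (q := fun c => decide (c ∈ LB))
      (fun a _ => by simp only [decide_eq_true_eq]; exact h a)]

lemma memB_byTime (avail_slots : List (String × List (String × List String)))
    (times : List String) (time c : String) (htime : time ∈ times) :
    (c ∈ (avail_slots.foldl (fun d rm =>
      rm.2.foldl (fun d tp =>
        if tp.1 ∈ PySem.Set.ofList times then
          d.modify tp.1 [] (fun s => PySem.Set.add s (PySem.List.pyGetD tp.2 0 ""))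
        else d) d) PySem.Dict.empty).getD time []) ↔ pvSched avail_slots time c := by
  rw [memB_outer]
  simp [htime, PySem.Dict.getD_empty]

-- ===== VERDICT (by name: the statement is the Claim_ definition above) =====
theorem cofl_coreq_spec : Claim_equal_cofl_coreq := by
  intro avail_slots coreqs times rooms _ hpre
  unfold Spec_cofl_coreq cofl_coreq cofl_coreq_alt
  refine PySem.List.foldl_congr_mem _ _ _ _ (fun conflicts time htime => ?_)
  refine PySem.List.foldl_congr_mem _ _ _ _ (fun acc pair _ => ?_)
  have hiff : ∀ x, (x ∈ avail_slots.foldl (fun cs rm =>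
      rm.2.foldl (fun cs tp =>
        if tp.1 == time then
          cs ++ [PySem.List.pyGetD (((rm.2.find? (fun q => q.1 == time)).map Prod.snd).getD []) 0 ""]
        else cs) cs) ([] : List String)) ↔
      (x ∈ (avail_slots.foldl (fun d rm =>
        rm.2.foldl (fun d tp =>
          if tp.1 ∈ PySem.Set.ofList times then
            d.modify tp.1 [] (fun s => PySem.Set.add s (PySem.List.pyGetD tp.2 0 ""))
          else d) d) PySem.Dict.empty).getD time []) :=
    fun x => (memA_courses avail_slots time x hpre.1).trans
      (memB_byTime avail_slots times time x htime).symm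
  exact count_if_congr pair _ _ hiff acc
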